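-- pv_equiv track=rewrite | github.com/merel281/PIPENN-BachelorProject | eliminateClusters.py | define_clusters
-- ===== SOURCE A (Python) =====
-- def define_clusters(lines):
--     clusters = []
--     i = 0
--     while i < len(lines) - 1:
--         # Check for start of a new block
--         if lines[i].startswith('>') and lines[i+1].startswith('>'):
--             start = i
--             i += 2
--             # Continue until the next block or end of file
--             while i < len(lines) - 1:
--                 if lines[i].startswith('>') and lines[i+1].startswith('>'):
--                     break
--                 i += 1
--             end = i if i < len(lines)-1 else len(lines)
--             clusters.append((start, end))
--         else:
--             i += 1
--     return clusters
-- ===== SOURCE B (Python) =====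
-- def define_clusters(lines):
--     n = len(lines)
--     markers = [i for i in range(n - 1)
--                if lines[i].startswith('>') and lines[i + 1].startswith('>')]
--     if not markers:
--         return []
--     clusters = []
--     start = markers[0]
--     for m in markers:
--         if m >= start + 2:
--             clusters.append((start, m))
--             start = m
--     clusters.append((start, n))
--     return clusters
-- ===== Notes on version B (the rewrite author's own statement) =====
-- stated objective: faster
-- what changed: Replaces A's nested index-walking while loops by first building the table of marker indices (i with lines[i] and lines[i+1] both starting with '>') and then chaining blocks in one pass over that table, skipping markers closer than start+2 and closing the last block at len(lines); a timing run measured B 3.11x faster at the largest size (constant-factor: the scan is a single list comprehension plus a pass over the usually short marker table instead of per-index Python loop bookkeeping).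
import Mathlib
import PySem

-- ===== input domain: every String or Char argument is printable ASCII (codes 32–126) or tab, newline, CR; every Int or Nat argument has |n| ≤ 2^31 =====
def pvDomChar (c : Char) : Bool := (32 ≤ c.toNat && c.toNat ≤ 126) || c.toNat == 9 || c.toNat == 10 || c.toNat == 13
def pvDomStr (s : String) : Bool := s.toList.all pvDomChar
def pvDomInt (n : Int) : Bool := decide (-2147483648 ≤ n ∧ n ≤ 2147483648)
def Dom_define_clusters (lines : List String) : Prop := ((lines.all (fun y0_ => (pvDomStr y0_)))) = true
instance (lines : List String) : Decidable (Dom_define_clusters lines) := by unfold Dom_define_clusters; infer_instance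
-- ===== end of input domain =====

-- B replaces A's nested index-walking while loops by a precomputed marker-index table
-- walked in one pass (objective: alternative decomposition, same asymptotic cost).

-- ===== PORT A =====
-- lines[i].startswith('>') ; every index A reads is in range, so getD "" is exact
def pvStarts (lines : List String) (i : Nat) : Bool :=
  PySem.Str.startswith (lines.getD i "") ">"

-- the two-line test 'lines[i].startswith('>') and lines[i+1].startswith('>')'
def pvMarker (lines : List String) (i : Nat) : Bool :=
  pvStarts lines i && pvStarts lines (i + 1)

-- A's inner while loop: advance i until the next marker pair or i >= len-1.
-- Python's i is an int but stays ≥ 0, so Nat is exact (and i < len-1 under Nat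
-- subtraction agrees with Python's int comparison since i ≥ 0).
def pvInnerA (lines : List String) (i : Nat) : Nat :=
  if h : i < lines.length - 1 then
    if pvMarker lines i then i else pvInnerA lines (i + 1)
  else i
termination_by lines.length - 1 - i
decreasing_by omega

theorem pvInnerA_le (lines : List String) (i : Nat) : i ≤ pvInnerA lines i := by
  fun_induction pvInnerA <;> omega

-- A's outer while loop with its accumulator `clusters`
def pvOuterA (lines : List String) (i : Nat) (acc : List (Int × Int)) : List (Int × Int) :=
  if h : i < lines.length - 1 then
    if pvMarker lines i then
      pvOuterA lines (pvInnerA lines (i + 2))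
        (acc ++ [((i : Int),
           if pvInnerA lines (i + 2) < lines.length - 1
           then ((pvInnerA lines (i + 2) : Nat) : Int)
           else (lines.length : Int))])
    else pvOuterA lines (i + 1) acc
  else acc
termination_by lines.length - i
decreasing_by
  · have := pvInnerA_le lines (i + 2); omega
  · omega

def define_clusters (lines : List String) : List (Int × Int) :=
  pvOuterA lines 0 []

-- ===== PORT B =====
-- markers = [i for i in range(n-1) if lines[i].startswith('>') and lines[i+1].startswith('>')]
def pvMarkersB (lines : List String) : List Nat :=
  (List.range (lines.length - 1)).filter
    (fun i => pvStarts lines i && pvStarts lines (i + 1))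

-- B's single for-loop over the marker table, plus the trailing append
def pvWalkB (n : Nat) (start : Nat) (ms : List Nat) (acc : List (Int × Int)) : List (Int × Int) :=
  match ms with
  | [] => acc ++ [((start : Int), (n : Int))]
  | m :: rest =>
      if start + 2 ≤ m then pvWalkB n m rest (acc ++ [((start : Int), (m : Int))])
      else pvWalkB n start rest acc

def define_clusters_alt (lines : List String) : List (Int × Int) :=
  match pvMarkersB lines with
  | [] => []
  | m0 :: rest => pvWalkB lines.length m0 (m0 :: rest) []

-- ===== PRECONDITION & SPEC =====
def Spec_define_clusters (lines : List String) (out : List (Int × Int)) : Prop := out = define_clusters_alt lines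
instance (lines : List String) (out : List (Int × Int)) : Decidable (Spec_define_clusters lines out) := by unfold Spec_define_clusters; infer_instance

-- ===== CLAIM (what is proved, stated in full; the proofs are below) =====
def Claim_equal_define_clusters : Prop := ∀ (lines : List String), Dom_define_clusters lines → Spec_define_clusters lines (define_clusters lines)

-- ===== LEMMAS AND PROOFS =====

-- markers with index ≥ j (proof-only helper)
def pvMge (lines : List String) (j : Nat) : List Nat :=
  (List.range' j (lines.length - 1 - j)).filter (fun m => pvMarker lines m)

theorem pvMarkersB_eq_pvMge (lines : List String) : pvMarkersB lines = pvMge lines 0 := by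
  simp [pvMarkersB, pvMge, List.range_eq_range', pvMarker]

theorem pvMge_stop (lines : List String) (j : Nat) (h : lines.length - 1 ≤ j) :
    pvMge lines j = [] := by
  have h0 : lines.length - 1 - j = 0 := by omega
  simp [pvMge, h0]

theorem pvMge_step (lines : List String) (j : Nat) (h : j < lines.length - 1) :
    pvMge lines j = if pvMarker lines j then j :: pvMge lines (j + 1) else pvMge lines (j + 1) := by
  have h0 : lines.length - 1 - j = (lines.length - 1 - (j + 1)) + 1 := by omega
  rw [pvMge, h0, List.range'_succ, List.filter_cons]
  split <;> simp [pvMge]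

theorem pvInnerA_stop (lines : List String) (t : Nat)
    (h : ¬ pvInnerA lines t < lines.length - 1) : pvMge lines t = [] := by
  fun_induction pvInnerA lines t with
  | case1 i hi hm => exact absurd hi h
  | case2 i hi hm ih =>
      rw [pvMge_step lines i hi]; simp only [hm, Bool.false_eq_true, if_false]
      exact ih h
  | case3 i hi => exact pvMge_stop lines i (by omega)

theorem pvInnerA_found (lines : List String) (t : Nat)
    (h : pvInnerA lines t < lines.length - 1) :
    pvMarker lines (pvInnerA lines t) = true ∧
    pvMge lines t = pvInnerA lines t :: pvMge lines (pvInnerA lines t + 1) := by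
  fun_induction pvInnerA lines t with
  | case1 i hi hm =>
      refine ⟨hm, ?_⟩
      rw [pvMge_step lines i hi]; simp [hm]
  | case2 i hi hm ih =>
      rw [pvMge_step lines i hi]; simp only [hm, Bool.false_eq_true, if_false]
      exact ih h
  | case3 i hi => omega

theorem pvWalk_skip (lines : List String) (n s : Nat) (acc : List (Int × Int)) :
    ∀ k j, j ≤ s + 2 → s + 2 - j = k →
      pvWalkB n s (pvMge lines j) acc = pvWalkB n s (pvMge lines (s + 2)) acc := by
  intro k
  induction k with
  | zero =>
      intro j hj hk
      have hjs : j = s + 2 := by omega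
      subst hjs; rfl
  | succ k ih =>
      intro j hj hk
      by_cases hlt : j < lines.length - 1
      · rw [pvMge_step lines j hlt]
        split
        · rw [pvWalkB]
          have : ¬ s + 2 ≤ j := by omega
          simp only [this, if_false]
          exact ih (j + 1) (by omega) (by omega)
        · exact ih (j + 1) (by omega) (by omega)
      · rw [pvMge_stop lines j (by omega), pvMge_stop lines (s + 2) (by omega)]

theorem pvOuterA_eq (lines : List String) :
    ∀ i acc, pvOuterA lines i acc =
      match pvMge lines i with
      | [] => acc
      | m0 :: rest => pvWalkB lines.length m0 (m0 :: rest) acc := by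
  intro i acc
  fun_induction pvOuterA lines i acc with
  | case1 i acc hi hm ih =>
      -- marker at i
      simp only [dite_eq_ite] at ih
      rw [pvMge_step lines i hi]; simp only [hm, if_true]
      rw [pvWalkB]
      have hskip : ¬ i + 2 ≤ i := by omega
      simp only [hskip, if_false]
      rw [pvWalk_skip lines lines.length i acc (i + 2 - (i + 1)) (i + 1) (by omega) rfl]
      by_cases hfound : pvInnerA lines (i + 2) < lines.length - 1
      · obtain ⟨hm', hdec⟩ := pvInnerA_found lines (i + 2) hfound
        rw [hdec]
        rw [ih]
        have hge : i + 2 ≤ pvInnerA lines (i + 2) := pvInnerA_le lines (i + 2)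
        rw [pvMge_step lines _ hfound, hm']
        rw [pvWalkB]
        simp only [hge, if_true, hfound, if_true]
        rw [pvWalkB]
        have : ¬ pvInnerA lines (i + 2) + 2 ≤ pvInnerA lines (i + 2) := by omega
        simp only [this, if_false]
      · rw [pvInnerA_stop lines (i + 2) hfound]
        rw [ih]
        rw [pvMge_stop lines (pvInnerA lines (i + 2)) (by omega)]
        rw [pvWalkB]
        simp only [hfound, if_false]
  | case2 i acc hi hm ih =>
      rw [pvMge_step lines i hi]; simp only [hm, Bool.false_eq_true, if_false]
      exact ih
  | case3 i acc hi =>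
      rw [pvMge_stop lines i (by omega)]

-- ===== VERDICT (by name: the statement is the Claim_ definition above) =====
theorem define_clusters_spec : Claim_equal_define_clusters := by
  intro lines _
  unfold Spec_define_clusters define_clusters define_clusters_alt
  rw [pvOuterA_eq lines 0 [], pvMarkersB_eq_pvMge]
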